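-- pv_equiv track=rewrite | github.com/sashinovitasari/POS_Tagger | stochas.py | count_tag_pair_sentence
-- ===== SOURCE A (Python) =====
-- def tag_loc_in_sentence(parsed_sentence,tag):
-- 	tag_loc = [word[1].lower() for word in parsed_sentence]
-- 	return [i for i, s in enumerate(tag_loc) if tag==s]
--
-- def count_tag_pair_sentence(parsed_sentence,tag1,tag2):
-- 	tag1_loc = tag_loc_in_sentence(parsed_sentence,tag1)
--
-- 	if tag1_loc!=[]:
-- 		pair_count=0
-- 		for id_tag1 in tag1_loc:
-- 			if (id_tag1!=len(parsed_sentence)-1):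
-- 				if (parsed_sentence[id_tag1+1][1]).lower()==tag2.lower():
-- 					pair_count+= 1
-- 		return pair_count
-- 	return 0
-- ===== SOURCE B (Python) =====
-- def count_tag_pair_sentence(parsed_sentence, tag1, tag2):
--     t2 = tag2.lower()
--     count = 0
--     for w, x in zip(parsed_sentence, parsed_sentence[1:]):
--         if w[1].lower() == tag1 and x[1].lower() == t2:
--             count += 1
--     return count
-- ===== Notes on version B (the rewrite author's own statement) =====
-- stated objective: simpler
-- what changed: Replaces A's two-pass scheme (build a list of all tag1 positions, then index back into the sentence for each position) by a single pass over adjacent pairs with a counter, keeping the asymmetric case handling (tag1 compared as-is against lowercased tags, tag2 lowercased once).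
import Mathlib
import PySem

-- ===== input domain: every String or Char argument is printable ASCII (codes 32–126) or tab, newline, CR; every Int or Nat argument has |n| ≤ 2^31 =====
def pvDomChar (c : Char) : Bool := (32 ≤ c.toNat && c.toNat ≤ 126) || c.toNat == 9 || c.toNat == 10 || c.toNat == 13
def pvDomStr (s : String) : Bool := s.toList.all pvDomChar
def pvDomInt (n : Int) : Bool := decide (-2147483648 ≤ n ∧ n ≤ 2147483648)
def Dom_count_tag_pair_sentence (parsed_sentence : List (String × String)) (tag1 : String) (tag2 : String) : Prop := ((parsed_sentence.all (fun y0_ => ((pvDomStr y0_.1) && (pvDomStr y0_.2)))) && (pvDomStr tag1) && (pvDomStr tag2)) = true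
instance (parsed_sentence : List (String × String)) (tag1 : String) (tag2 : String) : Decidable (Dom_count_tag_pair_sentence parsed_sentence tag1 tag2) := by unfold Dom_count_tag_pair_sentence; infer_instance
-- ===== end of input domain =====

-- B replaces A's two-pass scheme (collect all tag1 positions, then index back into the
-- sentence) by a single pass over adjacent pairs with a counter; objective: simpler.

-- ===== PORT A =====
-- helper: tag_loc_in_sentence
def tag_loc_in_sentence (parsed_sentence : List (String × String)) (tag : String) : List Int :=
  let tag_loc := parsed_sentence.map (fun word => PySem.Str.lower word.2)
  ((PySem.List.enumerate tag_loc 0).filter (fun p => tag == p.2)).map (fun p => p.1)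

def count_tag_pair_sentence (parsed_sentence : List (String × String)) (tag1 : String) (tag2 : String) : Int :=
  let tag1_loc := tag_loc_in_sentence parsed_sentence tag1
  if tag1_loc ≠ [] then
    tag1_loc.foldl (fun pair_count id_tag1 =>
      if id_tag1 ≠ (parsed_sentence.length : Int) - 1 then
        -- parsed_sentence[id_tag1+1] is always in range here (id_tag1 is a valid index ≠ last);
        -- the .getD default is never used
        if PySem.Str.lower ((PySem.List.pyGet? parsed_sentence (id_tag1 + 1)).getD ("", "")).2
             == PySem.Str.lower tag2 then pair_count + 1 else pair_count
      else pair_count) 0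
  else 0

-- ===== PORT B =====
def count_tag_pair_sentence_alt (parsed_sentence : List (String × String)) (tag1 : String) (tag2 : String) : Int :=
  let t2 := PySem.Str.lower tag2
  (parsed_sentence.zip parsed_sentence.tail).foldl (fun count p =>
    if PySem.Str.lower p.1.2 == tag1 && PySem.Str.lower p.2.2 == t2 then count + 1 else count) 0

-- ===== PRECONDITION & SPEC =====
def Spec_count_tag_pair_sentence (parsed_sentence : List (String × String)) (tag1 : String) (tag2 : String) (out : Int) : Prop := out = count_tag_pair_sentence_alt parsed_sentence tag1 tag2
instance (parsed_sentence : List (String × String)) (tag1 : String) (tag2 : String) (out : Int) : Decidable (Spec_count_tag_pair_sentence parsed_sentence tag1 tag2 out) := by unfold Spec_count_tag_pair_sentence; infer_instance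

-- ===== CLAIM (what is proved, stated in full; the proofs are below) =====
def Claim_equal_count_tag_pair_sentence : Prop := ∀ (parsed_sentence : List (String × String)) (tag1 : String) (tag2 : String), Dom_count_tag_pair_sentence parsed_sentence tag1 tag2 → Spec_count_tag_pair_sentence parsed_sentence tag1 tag2 (count_tag_pair_sentence parsed_sentence tag1 tag2)

-- ===== LEMMAS AND PROOFS =====

-- a counting foldl is the starting value plus a countP
theorem foldl_count_if {α : Type} (p : α → Bool) :
    ∀ (l : List α) (n : Int),
      l.foldl (fun (c : Int) x => if p x then c + 1 else c) n = n + l.countP p := by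
  intro l
  induction l with
  | nil => intro n; simp
  | cons x xs ih =>
    intro n
    simp only [List.foldl_cons, List.countP_cons, ih]
    by_cases h : p x = true
    · simp [h]; ring
    · simp [h]

-- A's loop body has a nested if; same counting reading
theorem foldl_count_if2 {α : Type} (p : α → Prop) [DecidablePred p] (q : α → Bool) :
    ∀ (l : List α) (n : Int),
      l.foldl (fun (c : Int) x => if p x then (if q x then c + 1 else c) else c) n
        = n + l.countP (fun x => decide (p x) && q x) := by
  intro l
  induction l with
  | nil => intro n; simp
  | cons x xs ih =>
    intro n
    simp only [List.foldl_cons, List.countP_cons, ih]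
    by_cases h1 : p x
    · by_cases h2 : q x = true
      · simp [h1, h2]; ring
      · simp [h1, h2]
    · simp [h1]

-- the core correspondence: counting matching positions via absolute indices into `full`
-- equals counting matching adjacent pairs of the suffix
theorem core_count (tag1 lt2 : String) :
    ∀ (l full : List (String × String)) (s : Nat), full.drop s = l →
      (PySem.List.enumerate (l.map (fun w => PySem.Str.lower w.2)) (s : Int)).countP
        (fun p => (tag1 == p.2) &&
          (decide (p.1 ≠ (full.length : Int) - 1) &&
           (PySem.Str.lower ((PySem.List.pyGet? full (p.1 + 1)).getD ("", "")).2 == lt2)))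
      = (l.zip l.tail).countP
          (fun q => PySem.Str.lower q.1.2 == tag1 && PySem.Str.lower q.2.2 == lt2) := by
  intro l
  induction l with
  | nil => intro full s h; simp
  | cons w l' ih =>
    intro full s h
    have hlen : full.length - s = l'.length + 1 := by
      have := congrArg List.length h
      simpa using this
    have hs : s < full.length := by omega
    have hdrop' : full.drop (s + 1) = l' := by
      have : (full.drop s).drop 1 = l' := by rw [h]; simp
      simpa [List.drop_drop, Nat.add_comm] using this
    have ihs := ih full (s + 1) hdrop'
    simp only [List.map_cons, PySem.List.enumerate_cons, List.countP_cons]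
    have hcast : ((s : Int) + 1) = ((s + 1 : Nat) : Int) := by push_cast; ring
    rw [hcast, ihs]
    cases l' with
    | nil =>
      -- w is the last element: s = full.length - 1
      have hflen : full.length = s + 1 := by simp at hlen; omega
      have hslast : (s : Int) = (full.length : Int) - 1 := by rw [hflen]; push_cast; ring
      simp [hslast]
    | cons x l'' =>
      have hne : (s : Int) ≠ (full.length : Int) - 1 := by
        have : l''.length + 2 ≤ full.length - s := by
          have := congrArg List.length hdrop'
          simp at this
          omega
        have : s + 2 ≤ full.length := by omega
        omega
      have hget : PySem.List.pyGet? full (((s + 1 : Nat) : Int)) = some x := by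
        rw [PySem.List.pyGet?_natCast]
        have : full[s+1]? = (full.drop (s+1)).head? := by
          rw [List.head?_drop]
        rw [this, hdrop']
        rfl
      have hbeq : (tag1 == PySem.Str.lower w.2) = (PySem.Str.lower w.2 == tag1) := by
        by_cases hq : tag1 = PySem.Str.lower w.2
        · simp [hq]
        · simp [hq, Ne.symm hq]
      simp only [hne, decide_true, ne_eq, not_false_eq_true, hget, Option.getD_some,
        Bool.true_and, hbeq, List.tail_cons, List.zip_cons_cons, List.countP_cons]

-- rewrite A's outer structure into the countP form
theorem a_eq_countP (parsed_sentence : List (String × String)) (tag1 tag2 : String) :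
    count_tag_pair_sentence parsed_sentence tag1 tag2
      = ((PySem.List.enumerate (parsed_sentence.map (fun w => PySem.Str.lower w.2)) 0).countP
          (fun p => (tag1 == p.2) &&
            (decide (p.1 ≠ (parsed_sentence.length : Int) - 1) &&
             (PySem.Str.lower ((PySem.List.pyGet? parsed_sentence (p.1 + 1)).getD ("", "")).2
                == PySem.Str.lower tag2))) : Int) := by
  unfold count_tag_pair_sentence tag_loc_in_sentence
  simp only []
  set e := PySem.List.enumerate (parsed_sentence.map (fun w => PySem.Str.lower w.2)) 0 with he
  by_cases hnil : ((e.filter (fun p => tag1 == p.2)).map (fun p => p.1)) = []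
  · -- empty positions list: both sides are 0
    simp only [hnil, ne_eq, not_true_eq_false, if_false]
    have : e.countP (fun p => (tag1 == p.2) &&
        (decide (p.1 ≠ (parsed_sentence.length : Int) - 1) &&
         (PySem.Str.lower ((PySem.List.pyGet? parsed_sentence (p.1 + 1)).getD ("", "")).2
            == PySem.Str.lower tag2))) = 0 := by
      rw [List.countP_eq_zero]
      intro p hp
      by_contra hcon
      simp only [Bool.and_eq_true] at hcon
      have hpin : p ∈ e.filter (fun p => tag1 == p.2) := List.mem_filter.mpr ⟨hp, hcon.1⟩
      have : p.1 ∈ (e.filter (fun p => tag1 == p.2)).map (fun p => p.1) :=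
        List.mem_map.mpr ⟨p, hpin, rfl⟩
      rw [hnil] at this
      exact absurd this (List.not_mem_nil)
    rw [this]; rfl
  · simp only [hnil, ne_eq, not_false_eq_true, if_true]
    rw [foldl_count_if2 (fun i => i ≠ (parsed_sentence.length : Int) - 1)
          (fun i => PySem.Str.lower ((PySem.List.pyGet? parsed_sentence (i + 1)).getD ("", "")).2
            == PySem.Str.lower tag2)]
    rw [List.countP_map, List.countP_filter]
    simp only [Int.zero_add]
    congr 1
    apply List.countP_congr
    intro p _
    simp only [Function.comp]
    by_cases h1 : tag1 == p.2 <;> by_cases h2 : p.1 = (parsed_sentence.length : Int) - 1 <;>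
      simp [h1, h2]

theorem b_eq_countP (parsed_sentence : List (String × String)) (tag1 tag2 : String) :
    count_tag_pair_sentence_alt parsed_sentence tag1 tag2
      = ((parsed_sentence.zip parsed_sentence.tail).countP
          (fun q => PySem.Str.lower q.1.2 == tag1
                    && PySem.Str.lower q.2.2 == PySem.Str.lower tag2) : Int) := by
  unfold count_tag_pair_sentence_alt
  rw [foldl_count_if]
  simp

-- ===== VERDICT (by name: the statement is the Claim_ definition above) =====
theorem count_tag_pair_sentence_spec : Claim_equal_count_tag_pair_sentence := by
  intro ps tag1 tag2 _
  unfold Spec_count_tag_pair_sentence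
  rw [a_eq_countP, b_eq_countP]
  have h := core_count tag1 (PySem.Str.lower tag2) ps ps 0 (by simp)
  simp only [Nat.cast_zero] at h
  rw [h]
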